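-- pv_equiv track=rewrite | github.com/Berteun/adventofcode2023 | day13/day13.py | get_reflections
-- ===== SOURCE A (Python) =====
-- def get_reflections(block):
--     reflections = []
--     for n in range(1, len(block)):
--         is_reflect = True
--         for y in range(n):
--             if n + y >= len(block):
--                 break
--             if block[n - y - 1] != block[n + y]:
--                 is_reflect = False
--                 break
--         if is_reflect:
--             reflections.append(n)
--     return reflections
-- ===== SOURCE B (Python) =====
-- def _z(s):
--     # Z-function: z[i] = length of longest common prefix of s and s[i:]
--     m = len(s)
--     z = [0] * m
--     if m:
--         z[0] = m
--     l = r = 0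
--     for i in range(1, m):
--         k = min(r - i, z[i - l]) if i < r else 0
--         while i + k < m and s[k] == s[i + k]:
--             k += 1
--         z[i] = k
--         if i + k > r:
--             l, r = i, i + k
--     return z
--
--
-- def get_reflections(block):
--     # A cut n is a mirror iff the even-length window of half-width min(n, m-n)
--     # centred at n is a palindrome, i.e. an even palindrome touching an edge.
--     # Edge-touching palindromes are read off two Z-arrays in O(m) comparisons.
--     m = len(block)
--     rev = block[::-1]
--     zf = _z(list(block) + [None] + rev)  # prefix palindromes of block
--     zb = _z(rev + [None] + list(block))  # suffix palindromes of block
--     out = []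
--     for n in range(1, m):
--         if 2 * n <= m:
--             if zf[m + 1 + (m - 2 * n)] == 2 * n:
--                 out.append(n)
--         else:
--             if zb[m + 1 + (2 * n - m)] == 2 * (m - n):
--                 out.append(n)
--     return out
-- ===== Notes on version B (the rewrite author's own statement) =====
-- stated objective: faster
-- what changed: A tests every cut with a fresh inner mirrored scan (worst-case quadratic in the number of rows); B observes that a cut is a mirror iff the even window centred on it and touching an edge is a palindrome, and reads all edge-touching even palindromes off two Z-function arrays built over block + [None] + reversed(block), doing a linear number of row comparisons.
import Mathlib
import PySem

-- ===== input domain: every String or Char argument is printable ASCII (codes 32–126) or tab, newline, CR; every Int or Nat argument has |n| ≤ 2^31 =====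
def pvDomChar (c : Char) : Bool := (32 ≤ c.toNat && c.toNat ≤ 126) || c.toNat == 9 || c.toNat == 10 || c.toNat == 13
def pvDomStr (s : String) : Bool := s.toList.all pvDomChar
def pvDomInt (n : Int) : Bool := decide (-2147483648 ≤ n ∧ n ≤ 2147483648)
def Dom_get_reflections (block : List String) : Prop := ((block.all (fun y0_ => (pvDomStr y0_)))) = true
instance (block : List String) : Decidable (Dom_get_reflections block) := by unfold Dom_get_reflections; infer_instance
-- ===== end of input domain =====

-- B replaces A's per-cut mirrored rescans by a linear-comparison algorithm: a cut n is a mirror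
-- iff the even window centred at n and touching an edge is a palindrome, and all edge-touching
-- even palindromes are read off two Z-function arrays (objective: alternative/faster worst case).

-- ===== PORT A =====
-- inner 'for y in range(n)' loop with its two breaks; indices are always in range when read
-- (y < n gives 0 ≤ n-y-1 < n ≤ len, and n+y < len is checked first), so comparing the
-- pyGet? options is exact Python behaviour.
def innerA (block : List String) (n : Int) : List Int → Bool
  | [] => true
  | y :: ys =>
    if (block.length : Int) ≤ n + y then true
    else if PySem.List.pyGet? block (n - y - 1) ≠ PySem.List.pyGet? block (n + y) then false
    else innerA block n ys

def get_reflections (block : List String) : List Int :=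
  (PySem.List.pyRange 1 (block.length : Int) 1).foldl
    (fun reflections n =>
      if innerA block n (PySem.List.pyRange 0 n 1) then reflections ++ [n] else reflections)
    []

-- ===== PORT B =====
-- the 'while i + k < m and s[k] == s[i + k]' extension loop of _z; the two compared
-- positions are always in range (k ≤ i + k < m), so comparing the getElem? options is exact.
def zext (t : List (Option String)) (i : Nat) (k : Nat) : Nat :=
  if h : i + k < t.length ∧ t[k]? = t[i + k]? then zext t i (k + 1) else k
termination_by t.length - k
decreasing_by omega

-- one iteration of _z's for-loop; state st = (z, l, r).  All Python values here are
-- nonnegative ints, and every Nat subtraction is guarded (i < r, resp. l < i), so Nat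
-- arithmetic agrees with Python's; z[i - l] is always in range, so getD reads it exactly.
def zstep (t : List (Option String)) (st : List Nat × Nat × Nat) (i : Nat) : List Nat × Nat × Nat :=
  let k0 := if i < st.2.2 then min (st.2.2 - i) (st.1.getD (i - st.2.1) 0) else 0
  let k := zext t i k0
  (st.1.set i k, if st.2.2 < i + k then (i, i + k) else st.2)

-- _z(s): z = [0]*m; if m: z[0] = m; then the for-loop over range(1, m)
def zarr (t : List (Option String)) : List Nat :=
  if t.length = 0 then []
  else ((List.range' 1 (t.length - 1)).foldl (zstep t) ((List.replicate t.length 0).set 0 t.length, 0, 0)).1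

-- get_reflections of Source B; [None] becomes the 'none' separator, rows become 'some row'.
-- Branch guards 2*n ≤ m / m < 2*n make the Nat subtractions m-2n / 2n-m exact Python values.
def get_reflections_alt (block : List String) : List Int :=
  let m := block.length
  let rev := block.reverse
  let zf := zarr (block.map some ++ [none] ++ rev.map some)
  let zb := zarr (rev.map some ++ [none] ++ block.map some)
  (List.range' 1 (m - 1)).foldl
    (fun out n =>
      if 2 * n ≤ m then
        if zf.getD (m + 1 + (m - 2 * n)) 0 = 2 * n then out ++ [(n : Int)] else out
      else
        if zb.getD (m + 1 + (2 * n - m)) 0 = 2 * (m - n) then out ++ [(n : Int)] else out)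
    []

-- ===== PRECONDITION & SPEC =====
def Spec_get_reflections (block : List String) (out : List Int) : Prop := out = get_reflections_alt block
instance (block : List String) (out : List Int) : Decidable (Spec_get_reflections block out) := by unfold Spec_get_reflections; infer_instance

-- ===== CLAIM (what is proved, stated in full; the proofs are below) =====
def Claim_equal_get_reflections : Prop := ∀ (block : List String), Dom_get_reflections block → Spec_get_reflections block (get_reflections block)

-- ===== LEMMAS AND PROOFS =====

-- ---------- A-side characterisation: A = filter of the mirrored-pairs test ----------

-- all(a == b for a, b in zip(L, R))
def pallB (L R : List String) : Bool := (L.zip R).all (fun q => q.1 == q.2)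

def mirB (block : List String) (k : Nat) : Bool :=
  pallB ((block.take k).reverse) (block.drop k)

def predB (block : List String) (k : Nat) : Bool := decide (0 < k) && mirB block k

lemma innerA_eq (block : List String) (n : Nat) (hn : n ≤ block.length) :
    ∀ (d y : Nat), y + d = n →
      innerA block (n : Int) (PySem.List.pyRange (y : Int) (n : Int) 1)
        = pallB (((block.take n).reverse).drop y) ((block.drop n).drop y) := by
  intro d
  induction d with
  | zero =>
    intro y hy
    have hy' : y = n := by omega
    rw [hy', PySem.List.pyRange_one_eq_nil le_rfl]
    rw [List.drop_eq_nil_of_le (by simp : ((block.take n).reverse).length ≤ n)]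
    simp [innerA, pallB]
  | succ d ih =>
    intro y hy
    have hyn : y < n := by omega
    rw [PySem.List.pyRange_one_cons (by exact_mod_cast hyn)]
    have hLlen : y < ((block.take n).reverse).length := by simp; omega
    rw [List.drop_eq_getElem_cons hLlen]
    have hLy : ((block.take n).reverse)[y]'hLlen = block[n - 1 - y]'(by omega) := by
      rw [List.getElem_reverse]
      simp only [List.getElem_take]
      congr 1
      simp; omega
    by_cases hb : n + y < block.length
    · have hRlen : y < (block.drop n).length := by simp; omega
      rw [List.drop_eq_getElem_cons hRlen]
      have hRy : (block.drop n)[y]'hRlen = block[n + y]'(by omega) := by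
        rw [List.getElem_drop]
      show innerA block (n : Int) (↑y :: PySem.List.pyRange (↑y + 1) (n : Int) 1) = _
      rw [innerA]
      have hcond : ¬ ((block.length : Int) ≤ (n : Int) + (y : Int)) := by omega
      rw [if_neg hcond]
      have hidx1 : (n : Int) - (y : Int) - 1 = ((n - 1 - y : Nat) : Int) := by omega
      have hidx2 : (n : Int) + (y : Int) = ((n + y : Nat) : Int) := by omega
      rw [hidx1, hidx2, PySem.List.pyGet?_natCast, PySem.List.pyGet?_natCast]
      rw [List.getElem?_eq_getElem (by omega : n - 1 - y < block.length),
          List.getElem?_eq_getElem (by omega : n + y < block.length)]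
      have hcast : ((y : Int) + 1) = ((y + 1 : Nat) : Int) := by omega
      by_cases he : block[n - 1 - y]'(by omega) = block[n + y]'(by omega)
      · rw [if_neg (by simp [he])]
        rw [hcast, ih (y + 1) (by omega)]
        simp only [pallB, List.zip_cons_cons, List.all_cons, hLy, hRy, he,
          beq_self_eq_true, Bool.true_and, List.drop_drop]
      · rw [if_pos (by simp [he])]
        simp only [pallB, List.zip_cons_cons, List.all_cons, hLy, hRy]
        simp [he]
    · show innerA block (n : Int) (↑y :: PySem.List.pyRange (↑y + 1) (n : Int) 1) = _
      rw [innerA]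
      rw [if_pos (by omega : (block.length : Int) ≤ (n : Int) + (y : Int))]
      have : (block.drop n).drop y = [] := by
        apply List.drop_eq_nil_of_le
        simp; omega
      rw [this]
      simp [pallB]

lemma a_filter (block : List String) :
    get_reflections block
      = ((List.range (block.length - 1)).filter (fun k => predB block (k + 1))).map
          (fun k => ((k + 1 : Nat) : Int)) := by
  unfold get_reflections
  rw [PySem.List.foldl_append_if (fun n => innerA block n (PySem.List.pyRange 0 n 1))
      (fun n => n)]
  rw [PySem.List.pyRange_one]
  have hlen : ((block.length : Int) - 1).toNat = block.length - 1 := by omega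
  rw [hlen, List.filter_map, List.map_map]
  simp only [List.nil_append, Function.comp_def]
  have hpred : ∀ k ∈ List.range (block.length - 1),
      innerA block ((1 : Int) + (k : Int)) (PySem.List.pyRange 0 ((1:Int) + (k:Int)) 1)
        = predB block (k + 1) := by
    intro k hk
    have hk' : k < block.length - 1 := List.mem_range.mp hk
    have hc : (1 : Int) + (k : Int) = ((k + 1 : Nat) : Int) := by push_cast; ring_nf
    rw [hc]
    have h0 : ((0 : Nat) : Int) = (0 : Int) := by norm_num
    rw [← h0, innerA_eq block (k + 1) (by omega) (k + 1) 0 (by omega)]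
    simp [predB, mirB]
  rw [List.filter_congr hpred]
  apply List.map_congr_left
  intro k _
  push_cast; ring

-- ---------- longest-common-prefix function and its characterisation ----------

def lcpLen : List (Option String) → List (Option String) → Nat
  | a :: as, b :: bs => if a = b then lcpLen as bs + 1 else 0
  | _, _ => 0

lemma lcp_le_right : ∀ a b, lcpLen a b ≤ b.length := by
  intro a
  induction a with
  | nil => intro b; cases b <;> simp [lcpLen]
  | cons x as ih =>
    intro b
    cases b with
    | nil => simp [lcpLen]
    | cons y bs =>
      unfold lcpLen
      split_ifs
      · have := ih bs; simp; omega
      · simp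

lemma lcp_get : ∀ a b j, j < lcpLen a b → a[j]? = b[j]? := by
  intro a
  induction a with
  | nil => intro b j h; cases b <;> simp [lcpLen] at h
  | cons x as ih =>
    intro b j h
    cases b with
    | nil => simp [lcpLen] at h
    | cons y bs =>
      unfold lcpLen at h
      split_ifs at h with he
      · cases j with
        | zero => simp [he]
        | succ j => simpa using ih bs j (by omega)
      · omega

lemma lcp_stop : ∀ a b, lcpLen a b < a.length → lcpLen a b < b.length →
    a[lcpLen a b]? ≠ b[lcpLen a b]? := by
  intro a
  induction a with
  | nil => intro b h _; simp at h
  | cons x as ih =>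
    intro b h1 h2
    cases b with
    | nil => simp at h2
    | cons y bs =>
      rw [show lcpLen (x :: as) (y :: bs) = if x = y then lcpLen as bs + 1 else 0 from rfl] at h1 h2 ⊢
      split_ifs at * with he
      · simpa using ih bs (by simpa using h1) (by simpa using h2)
      · simpa using he

lemma lcp_ge : ∀ a b k, (∀ j, j < k → a[j]? = b[j]?) → k ≤ a.length → k ≤ b.length →
    k ≤ lcpLen a b := by
  intro a
  induction a with
  | nil =>
    intro b k _ h _
    simp at h
    have h0 : lcpLen [] b = 0 := by cases b <;> rfl
    omega
  | cons x as ih =>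
    intro b k hmatch ha hb
    cases b with
    | nil =>
      simp at hb
      have h0 : lcpLen (x :: as) [] = 0 := rfl
      omega
    | cons y bs =>
      cases k with
      | zero => omega
      | succ k =>
        have h0 : x = y := by have := hmatch 0 (by omega); simpa using this
        unfold lcpLen
        rw [if_pos h0]
        have : k ≤ lcpLen as bs := by
          apply ih bs k
          · intro j hj
            have := hmatch (j + 1) (by omega)
            simpa using this
          · simpa using ha
          · simpa using hb
        omega

lemma lcp_eq_right_iff : ∀ (a b : List (Option String)), b.length ≤ a.length →
    (lcpLen a b = b.length ↔ a.take b.length = b) := by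
  intro a
  induction a with
  | nil =>
    intro b hb
    have : b = [] := by cases b <;> simp_all
    subst this; simp [lcpLen]
  | cons x as ih =>
    intro b hb
    cases b with
    | nil => simp [lcpLen]
    | cons y bs =>
      unfold lcpLen
      simp only [List.length_cons, List.take_succ_cons, List.cons_eq_cons]
      split_ifs with he
      · subst he
        constructor
        · intro h
          exact ⟨rfl, (ih bs (by simpa using hb)).mp (by omega)⟩
        · intro h
          have := (ih bs (by simpa using hb)).mpr h.2
          omega
      · constructor
        · intro h
          exfalso
          have := lcp_le_right as bs  -- unused bound; contradiction from h
          omega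
        · intro h; exact absurd h.1 he

-- ---------- correctness of the ported Z-function ----------

lemma zext_eq (t : List (Option String)) (i : Nat) :
    ∀ d k, lcpLen t (t.drop i) - k = d → k ≤ lcpLen t (t.drop i) →
      zext t i k = lcpLen t (t.drop i) := by
  intro d
  induction d with
  | zero =>
    intro k hd hk
    have hk' : k = lcpLen t (t.drop i) := by omega
    subst hk'
    rw [zext]
    rw [dif_neg]
    rintro ⟨h1, h2⟩
    have hlt1 : lcpLen t (t.drop i) < t.length := by omega
    have hlt2 : lcpLen t (t.drop i) < (t.drop i).length := by simp; omega
    have := lcp_stop t (t.drop i) hlt1 hlt2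
    rw [List.getElem?_drop] at this
    exact this h2
  | succ d ih =>
    intro k hd hk
    have hklt : k < lcpLen t (t.drop i) := by omega
    rw [zext]
    rw [dif_pos]
    · exact ih (k + 1) (by omega) (by omega)
    · constructor
      · have := lcp_le_right t (t.drop i)
        simp only [List.length_drop] at this
        omega
      · have := lcp_get t (t.drop i) k hklt
        rw [List.getElem?_drop] at this
        exact this

def ZInv (t : List (Option String)) (i : Nat) (st : List Nat × Nat × Nat) : Prop :=
  st.1.length = t.length ∧
  (∀ j, 1 ≤ j → j < i → st.1.getD j 0 = lcpLen t (t.drop j)) ∧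
  (∀ j, i ≤ j → st.1.getD j 0 = 0) ∧
  st.2.1 < i ∧
  st.2.2 ≤ st.2.1 + lcpLen t (t.drop st.2.1)

lemma zstep_inv (t : List (Option String)) (i : Nat) (st : List Nat × Nat × Nat)
    (hinv : ZInv t i st) (hi1 : 1 ≤ i) (him : i < t.length) :
    ZInv t (i + 1) (zstep t st i) := by
  obtain ⟨hlen, hdone, hzero, hl, hr⟩ := hinv
  obtain ⟨z, l, r⟩ := st
  simp only at hlen hdone hzero hl hr
  have hseed : (if i < r then min (r - i) (z.getD (i - l) 0) else 0) ≤ lcpLen t (t.drop i) := by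
    split_ifs with hir
    · by_cases hl0 : l = 0
      · subst hl0
        simp only [Nat.sub_zero]
        rw [hzero i le_rfl]
        omega
      · have hil : 1 ≤ i - l ∧ i - l < i := by omega
        rw [hdone (i - l) hil.1 hil.2]
        apply lcp_ge
        · intro j hj
          have hj1 : j < lcpLen t (t.drop (i - l)) := by omega
          have hj2 : i - l + j < r - l := by omega
          have hj3 : i - l + j < lcpLen t (t.drop l) := by omega
          -- t[i+j]? = t[i-l+j]? via the palindrome-free match at shift l
          have hm1 : t[(i - l) + j]? = t[j]? := by
            have := lcp_get t (t.drop (i - l)) j hj1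
            rw [List.getElem?_drop] at this
            exact this.symm
          have hm2 : t[l + ((i - l) + j)]? = t[(i - l) + j]? := by
            have := lcp_get t (t.drop l) ((i - l) + j) hj3
            rw [List.getElem?_drop] at this
            exact this.symm
          have hidx : l + ((i - l) + j) = i + j := by omega
          rw [List.getElem?_drop, ← hidx, hm2, hm1]
        · have h1 := lcp_le_right t (t.drop l)
          simp only [List.length_drop] at h1
          omega
        · have h1 := lcp_le_right t (t.drop l)
          simp only [List.length_drop] at h1
          simp only [List.length_drop]
          omega
    · omega
  set k0 := (if i < r then min (r - i) (z.getD (i - l) 0) else 0) with hk0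
  have hk : zext t i k0 = lcpLen t (t.drop i) := by
    apply zext_eq t i (lcpLen t (t.drop i) - k0) k0 rfl hseed
  unfold zstep
  simp only [← hk0, hk]
  refine ⟨by simpa using hlen, ?_, ?_, ?_, ?_⟩
  · intro j hj1 hj2
    by_cases hji : j = i
    · subst hji
      rw [List.getD_eq_getElem?_getD, List.getElem?_set_self (by omega)]
      rfl
    · rw [List.getD_eq_getElem?_getD, List.getElem?_set_ne (by omega),
        ← List.getD_eq_getElem?_getD]
      exact hdone j hj1 (by omega)
  · intro j hj
    rw [List.getD_eq_getElem?_getD, List.getElem?_set_ne (by omega),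
      ← List.getD_eq_getElem?_getD]
    exact hzero j (by omega)
  · split_ifs
    all_goals simp
    all_goals omega
  · split_ifs with h
    · simp
    · simp only
      omega

lemma zfold_inv (t : List (Option String)) :
    ∀ (c i : Nat) (st : List Nat × Nat × Nat), ZInv t i st → 1 ≤ i → i + c = t.length →
      ZInv t t.length ((List.range' i c).foldl (zstep t) st) := by
  intro c
  induction c with
  | zero =>
    intro i st hinv hi1 hic
    simpa [← hic] using hinv
  | succ c ih =>
    intro i st hinv hi1 hic
    rw [List.range'_succ, List.foldl_cons]
    exact ih (i + 1) _ (zstep_inv t i st hinv hi1 (by omega)) (by omega) (by omega)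

lemma zarr_getD (t : List (Option String)) (p : Nat) (hp1 : 1 ≤ p) (hp : p < t.length) :
    (zarr t).getD p 0 = lcpLen t (t.drop p) := by
  unfold zarr
  rw [if_neg (by omega)]
  have hinv : ZInv t 1 ((List.replicate t.length 0).set 0 t.length, 0, 0) := by
    unfold ZInv
    refine ⟨by simp, by intro j hj1 hj2; omega, ?_, by norm_num, by simp⟩
    intro j hj
    rw [List.getD_eq_getElem?_getD, List.getElem?_set_ne (by omega)]
    by_cases hjl : j < t.length
    · simp [hjl]
    · rw [List.getElem?_eq_none (by simpa using hjl)]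
      rfl
  have := zfold_inv t (t.length - 1) 1 _ hinv le_rfl (by omega)
  exact this.2.1 p hp1 hp

-- ---------- the window test read off the Z-arrays equals A's mirrored-pairs test ----------

lemma pallB_iff (L R : List String) :
    pallB L R = true ↔ L.take R.length = R.take L.length := by
  induction L generalizing R with
  | nil => simp [pallB]
  | cons a as ih =>
    cases R with
    | nil => simp [pallB]
    | cons b bs =>
      simp only [pallB, List.zip_cons_cons, List.all_cons, Bool.and_eq_true, beq_iff_eq,
        List.length_cons, List.take_succ_cons, List.cons_eq_cons]
      rw [← ih bs]
      simp [pallB]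

lemma drop_append_len {α : Type} (l1 l2 : List α) (i : Nat) :
    (l1 ++ l2).drop (l1.length + i) = l2.drop i := by
  rw [List.drop_append]
  simp

-- palindromicity of the edge-touching window ↔ A's mirrored test, left-fitting case
lemma mir_take (block : List String) (n : Nat) (h1 : 1 ≤ n) (h2 : 2 * n ≤ block.length) :
    (block.take (2 * n) = (block.take (2 * n)).reverse) ↔ mirB block n = true := by
  have hn : n ≤ block.length := by omega
  have hlt : (block.take n).length = n := by simp; omega
  have hlr : ((block.drop n).take n).length = n := by simp; omega
  rw [mirB, pallB_iff]
  have e1 : ((block.take n).reverse).take ((block.drop n).length)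
      = (block.take n).reverse := by
    apply List.take_of_length_le
    simp
    omega
  have e2 : (block.drop n).take (((block.take n).reverse).length)
      = (block.drop n).take n := by
    congr 1
    simp
    omega
  have hsplit : block.take (2 * n) = block.take n ++ (block.drop n).take n := by
    rw [two_mul, List.take_add]
  rw [e1, e2, hsplit, List.reverse_append]
  constructor
  · intro h
    exact (List.append_inj h (by simp [hlt, hlr])).2.symm
  · intro h
    rw [← h, List.reverse_reverse]

lemma mir_drop (block : List String) (n : Nat) (h1 : block.length < 2 * n)
    (h2 : n < block.length) :
    (block.drop (2 * n - block.length) = (block.drop (2 * n - block.length)).reverse)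
      ↔ mirB block n = true := by
  set m := block.length with hm
  set w := m - n with hw
  have hn : n ≤ m := by omega
  have hvlen : (block.drop (2 * n - m)).length = 2 * w := by simp [← hm]; omega
  rw [mirB, pallB_iff]
  have e2 : (block.drop n).take (((block.take n).reverse).length) = block.drop n := by
    apply List.take_of_length_le
    simp [← hm]
    omega
  have e1 : ((block.take n).reverse).take ((block.drop n).length)
      = ((block.drop (2 * n - m)).take w).reverse := by
    have hc : (block.take n).length - (block.drop n).length = 2 * n - m := by
      simp only [List.length_take, List.length_drop]
      omega
    rw [List.take_reverse, hc, List.drop_take,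
      show n - (2 * n - m) = w by omega]
  have hsplit : block.drop (2 * n - m)
      = (block.drop (2 * n - m)).take w ++ block.drop n := by
    conv_lhs => rw [← List.take_append_drop w (block.drop (2 * n - m))]
    rw [List.drop_drop]
    congr 2
    omega
  have hwlen : ((block.drop (2 * n - m)).take w).length = w := by
    simp [hvlen]
    omega
  have hdlen : (block.drop n).length = w := by simp [← hm, hw]
  rw [e1, e2]
  constructor
  · intro h
    conv_lhs at h => rw [hsplit]
    conv_rhs at h => rw [hsplit]
    rw [List.reverse_append] at h
    exact (List.append_inj h (by simp [hwlen, hdlen])).2.symm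
  · intro h
    conv_lhs => rw [hsplit]
    conv_rhs => rw [hsplit]
    rw [List.reverse_append, ← h, List.reverse_reverse]

-- condB: the per-cut test B's main loop performs, as a Boolean on the cut index
def condB (block : List String) (n : Nat) : Bool :=
  let m := block.length
  if 2 * n ≤ m then
    decide ((zarr (block.map some ++ [none] ++ block.reverse.map some)).getD (m + 1 + (m - 2 * n)) 0 = 2 * n)
  else
    decide ((zarr (block.reverse.map some ++ [none] ++ block.map some)).getD (m + 1 + (2 * n - m)) 0 = 2 * (m - n))

lemma map_some_inj (u v : List String) (h : u.map some = v.map some) : u = v := by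
  have := congrArg (List.map (fun o => Option.getD o "")) h
  simpa using this

lemma condB_eq_predB (block : List String) (n : Nat) (h1 : 1 ≤ n) (h2 : n < block.length) :
    condB block n = predB block n := by
  set m := block.length with hm
  have hpd : predB block n = mirB block n := by
    unfold predB
    rw [decide_eq_true (by omega : 0 < n), Bool.true_and]
  rw [hpd]
  unfold condB
  simp only [← hm]
  by_cases hc : 2 * n ≤ m
  · rw [if_pos hc]
    set t := block.map some ++ [none] ++ block.reverse.map some with ht
    have htlen : t.length = 2 * m + 1 := by simp [ht, ← hm]; omega
    have hpos : m + 1 + (m - 2 * n) < t.length := by omega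
    rw [zarr_getD t _ (by omega) hpos]
    have hdrop : t.drop (m + 1 + (m - 2 * n)) = ((block.take (2 * n)).reverse).map some := by
      have hl : (block.map some ++ [(none : Option String)]).length = m + 1 := by
        simp [← hm]
      rw [ht, show m + 1 + (m - 2 * n)
          = (block.map some ++ [(none : Option String)]).length + (m - 2 * n) by rw [hl]]
      rw [drop_append_len]
      rw [← List.map_drop, List.drop_reverse,
        show block.length - (m - 2 * n) = 2 * n by omega]
    have hdlen : (t.drop (m + 1 + (m - 2 * n))).length = 2 * n := by
      rw [hdrop]; simp; omega
    have hiff := lcp_eq_right_iff t (t.drop (m + 1 + (m - 2 * n))) (by omega)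
    rw [hdlen] at hiff
    have htake : t.take (2 * n) = (block.take (2 * n)).map some := by
      rw [ht, List.append_assoc, List.take_append_of_le_length (by simp [← hm]; omega),
        List.map_take]
    have hiff2 : lcpLen t (t.drop (m + 1 + (m - 2 * n))) = 2 * n ↔ mirB block n = true := by
      rw [hiff, hdrop, htake, ← mir_take block n h1 hc]
      constructor
      · intro h; exact map_some_inj _ _ h
      · intro h; rw [← h]
    cases hmb : mirB block n
    · simp only [decide_eq_false_iff_not]
      rw [hiff2, hmb]
      simp
    · simp only [decide_eq_true_iff]
      rw [hiff2, hmb]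
  · rw [if_neg hc]
    have hc' : m < 2 * n := by omega
    set t := block.reverse.map some ++ [none] ++ block.map some with ht
    have htlen : t.length = 2 * m + 1 := by simp [ht, ← hm]; omega
    have hpos : m + 1 + (2 * n - m) < t.length := by omega
    rw [zarr_getD t _ (by omega) hpos]
    have hdrop : t.drop (m + 1 + (2 * n - m)) = (block.drop (2 * n - m)).map some := by
      have hl : (block.reverse.map some ++ [(none : Option String)]).length = m + 1 := by
        simp [← hm]
      rw [ht, show m + 1 + (2 * n - m)
          = (block.reverse.map some ++ [(none : Option String)]).length + (2 * n - m) by rw [hl]]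
      rw [drop_append_len]
      rw [List.map_drop]
    have hdlen : (t.drop (m + 1 + (2 * n - m))).length = 2 * (m - n) := by
      rw [hdrop]; simp [← hm]; omega
    have hiff := lcp_eq_right_iff t (t.drop (m + 1 + (2 * n - m))) (by omega)
    rw [hdlen] at hiff
    have htake : t.take (2 * (m - n)) = ((block.drop (2 * n - m)).reverse).map some := by
      rw [ht, List.append_assoc, List.take_append_of_le_length (by simp [← hm]; omega),
        ← List.map_take, List.take_reverse,
        show block.length - 2 * (m - n) = 2 * n - m by omega]
    have hiff2 : lcpLen t (t.drop (m + 1 + (2 * n - m))) = 2 * (m - n) ↔ mirB block n = true := by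
      rw [hiff, hdrop, htake, ← mir_drop block n hc' h2]
      constructor
      · intro h; exact (map_some_inj _ _ h).symm
      · intro h; rw [← h]
    cases hmb : mirB block n
    · simp only [decide_eq_false_iff_not]
      rw [hiff2, hmb]
      simp
    · simp only [decide_eq_true_iff]
      rw [hiff2, hmb]

lemma b_filter (block : List String) :
    get_reflections_alt block
      = ((List.range' 1 (block.length - 1)).filter (condB block)).map (fun n : Nat => (n : Int)) := by
  unfold get_reflections_alt
  simp only
  have hbody : (fun (out : List Int) (n : Nat) =>
      if 2 * n ≤ block.length then
        if (zarr (block.map some ++ [none] ++ block.reverse.map some)).getD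
            (block.length + 1 + (block.length - 2 * n)) 0 = 2 * n then out ++ [(n : Int)] else out
      else
        if (zarr (block.reverse.map some ++ [none] ++ block.map some)).getD
            (block.length + 1 + (2 * n - block.length)) 0 = 2 * (block.length - n) then
          out ++ [(n : Int)] else out)
      = (fun (out : List Int) (n : Nat) => if condB block n then out ++ [(n : Int)] else out) := by
    funext out n
    unfold condB
    simp only
    by_cases hc : 2 * n ≤ block.length
    · rw [if_pos hc, if_pos hc]
      by_cases hz : (zarr (block.map some ++ [none] ++ block.reverse.map some)).getD
          (block.length + 1 + (block.length - 2 * n)) 0 = 2 * n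
      · rw [if_pos hz, if_pos (by simpa using hz)]
      · rw [if_neg hz, if_neg (by simpa using hz)]
    · rw [if_neg hc, if_neg hc]
      by_cases hz : (zarr (block.reverse.map some ++ [none] ++ block.map some)).getD
          (block.length + 1 + (2 * n - block.length)) 0 = 2 * (block.length - n)
      · rw [if_pos hz, if_pos (by simpa using hz)]
      · rw [if_neg hz, if_neg (by simpa using hz)]
  rw [hbody, PySem.List.foldl_append_if (condB block) (fun n : Nat => (n : Int))]
  simp

-- ===== VERDICT (by name: the statement is the Claim_ definition above) =====
theorem get_reflections_spec : Claim_equal_get_reflections := by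
  intro block _
  unfold Spec_get_reflections
  rw [a_filter, b_filter, List.range'_eq_map_range, List.filter_map, List.map_map]
  rw [List.filter_congr (by
    intro k hk
    have hk' : k < block.length - 1 := List.mem_range.mp hk
    simp only [Function.comp]
    rw [show 1 + k = k + 1 by omega]
    exact condB_eq_predB block (k + 1) (by omega) (by omega) :
    ∀ k ∈ List.range (block.length - 1),
      ((condB block) ∘ fun k => 1 + k) k = (fun k => predB block (k + 1)) k)]
  symm
  apply List.map_congr_left
  intro k _
  simp [Function.comp]
  omega
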